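-- pv_equiv track=rewrite | github.com/LSe-Yeong/Backjoon | python/백준 문제집/P3758.py | update_p
-- ===== SOURCE A (Python) =====
-- def update_p(logs,n,k):
--     s_sum=[0 for j in range(n+1)]
--     scores=[[0 for j in range(k+1)] for m in range(n+1)]
--     time=[0 for j in range(n+1)]
--     count=[0 for j in range(n+1)]
--     second=1
--
--     for t,p,s in logs:
--         if(s>scores[t][p]):
--             s_sum[t]+=(s-scores[t][p])
--             scores[t][p]=s
--         time[t]=second
--         second+=1
--         count[t]+=1
--
--     teams=[]
--
--     for i in range(1,n+1):
--         teams.append((i,s_sum[i],count[i],time[i]))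
--
--     return teams
-- ===== SOURCE B (Python) =====
-- def update_p(logs, n, k):
--     scores = [[0] * (k + 1) for _ in range(n + 1)]
--     time = [0] * (n + 1)
--     count = [0] * (n + 1)
--     for sec, (t, p, s) in enumerate(logs, 1):
--         scores[t][p] = max(scores[t][p], s)
--         time[t] = sec
--         count[t] += 1
--     return [(i, sum(scores[i]), count[i], time[i]) for i in range(1, n + 1)]
-- ===== Notes on version B (the rewrite author's own statement) =====
-- stated objective: simpler
-- what changed: Drops A's incremental delta accumulation into s_sum: B only keeps a group-max grid (scores[t][p]=max(...)), and derives each team's score sum by a summation pass over its row at output time; the manual 'second' counter becomes enumerate and the output is a comprehension.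
import Mathlib
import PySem

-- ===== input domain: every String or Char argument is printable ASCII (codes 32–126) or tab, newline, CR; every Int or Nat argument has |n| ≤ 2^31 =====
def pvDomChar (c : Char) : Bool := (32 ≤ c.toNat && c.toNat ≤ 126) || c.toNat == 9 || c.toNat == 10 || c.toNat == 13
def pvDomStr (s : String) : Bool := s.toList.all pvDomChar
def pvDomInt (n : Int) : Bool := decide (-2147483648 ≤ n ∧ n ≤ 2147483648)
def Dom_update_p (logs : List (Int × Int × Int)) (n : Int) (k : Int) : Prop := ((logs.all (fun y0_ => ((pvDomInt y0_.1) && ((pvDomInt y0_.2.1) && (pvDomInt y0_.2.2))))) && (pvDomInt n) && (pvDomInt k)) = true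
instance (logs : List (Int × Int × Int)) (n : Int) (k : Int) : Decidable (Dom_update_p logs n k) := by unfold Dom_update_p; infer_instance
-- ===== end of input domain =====

-- B drops A's incremental delta accumulation of s_sum: it keeps only a group-max grid and
-- derives each team's score sum by a summation pass over its row at output time
-- (objective: simpler — shorter, no running-sum bookkeeping; same asymptotic cost).


-- ===== PORT A =====
-- loop body of A's 'for t,p,s in logs' over state (s_sum, scores, time, count, second)
def pvStepA (st : List Int × List (List Int) × List Int × List Int × Int)
    (log : Int × Int × Int) : List Int × List (List Int) × List Int × List Int × Int :=
  match st, log with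
  | (s_sum, scores, time, count, second), (t, p, s) =>
    let row := PySem.List.pyGetD scores t []
    let cur := PySem.List.pyGetD row p 0
    let s_sum' := if s > cur then PySem.List.pySetD s_sum t (PySem.List.pyGetD s_sum t 0 + (s - cur)) else s_sum
    let scores' := if s > cur then PySem.List.pySetD scores t (PySem.List.pySetD row p s) else scores
    let time' := PySem.List.pySetD time t second
    let count' := PySem.List.pySetD count t (PySem.List.pyGetD count t 0 + 1)
    (s_sum', scores', time', count', second + 1)

def update_p (logs : List (Int × Int × Int)) (n : Int) (k : Int) : List (Int × Int × Int × Int) :=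
  let s_sum := (PySem.List.pyRange 0 (n+1) 1).map (fun _ => (0 : Int))
  let scores := (PySem.List.pyRange 0 (n+1) 1).map (fun _ => (PySem.List.pyRange 0 (k+1) 1).map (fun _ => (0 : Int)))
  let time := (PySem.List.pyRange 0 (n+1) 1).map (fun _ => (0 : Int))
  let count := (PySem.List.pyRange 0 (n+1) 1).map (fun _ => (0 : Int))
  let st := logs.foldl pvStepA (s_sum, scores, time, count, 1)
  (PySem.List.pyRange 1 (n+1) 1).map (fun i =>
    (i, PySem.List.pyGetD st.1 i 0, PySem.List.pyGetD st.2.2.2.1 i 0, PySem.List.pyGetD st.2.2.1 i 0))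

-- ===== PORT B =====
-- loop body of B's 'for sec, (t, p, s) in enumerate(logs, 1)' over state (scores, time, count)
def pvStepB (st : List (List Int) × List Int × List Int)
    (e : Int × (Int × Int × Int)) : List (List Int) × List Int × List Int :=
  match st, e with
  | (scores, time, count), (sec, (t, p, s)) =>
    let row := PySem.List.pyGetD scores t []
    let scores' := PySem.List.pySetD scores t (PySem.List.pySetD row p (max (PySem.List.pyGetD row p 0) s))
    let time' := PySem.List.pySetD time t sec
    let count' := PySem.List.pySetD count t (PySem.List.pyGetD count t 0 + 1)
    (scores', time', count')

def update_p_alt (logs : List (Int × Int × Int)) (n : Int) (k : Int) : List (Int × Int × Int × Int) :=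
  let scores := List.replicate (n+1).toNat (List.replicate (k+1).toNat (0 : Int))
  let time := List.replicate (n+1).toNat (0 : Int)
  let count := List.replicate (n+1).toNat (0 : Int)
  let st := (PySem.List.enumerate logs 1).foldl pvStepB (scores, time, count)
  (PySem.List.pyRange 1 (n+1) 1).map (fun i =>
    (i, (PySem.List.pyGetD st.1 i []).sum, PySem.List.pyGetD st.2.2 i 0, PySem.List.pyGetD st.2.1 i 0))

-- ===== PRECONDITION & SPEC =====
-- Pre_ is exactly A's return domain: A raises IndexError as soon as a log's team id is outside
-- [-(n+1), n] or its problem id is outside [-(k+1), k] (Python's list indexing with wraparound).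
def Pre_update_p (logs : List (Int × Int × Int)) (n : Int) (k : Int) : Prop :=
  ∀ l ∈ logs, -(n+1) ≤ l.1 ∧ l.1 < n+1 ∧ -(k+1) ≤ l.2.1 ∧ l.2.1 < k+1
instance (logs : List (Int × Int × Int)) (n : Int) (k : Int) : Decidable (Pre_update_p logs n k) := by
  unfold Pre_update_p; infer_instance

def pvWitness_update_p : (List (Int × Int × Int)) × Int × Int := ([(1, 1, 5), (2, 1, 3), (1, 1, 7)], 2, 1)

def Spec_update_p (logs : List (Int × Int × Int)) (n : Int) (k : Int) (out : List (Int × Int × Int × Int)) : Prop := out = update_p_alt logs n k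
instance (logs : List (Int × Int × Int)) (n : Int) (k : Int) (out : List (Int × Int × Int × Int)) : Decidable (Spec_update_p logs n k out) := by unfold Spec_update_p; infer_instance

-- ===== CLAIM (what is proved, stated in full; the proofs are below) =====
def Claim_equal_update_p : Prop := ∀ (logs : List (Int × Int × Int)) (n : Int) (k : Int), Dom_update_p logs n k → Pre_update_p logs n k → Spec_update_p logs n k (update_p logs n k)

-- ===== LEMMAS AND PROOFS =====

-- the Nat index Python's xs[i] resolves to when i is in range (wraparound for negative i)
def pvIdx (m : Nat) (i : Int) : Nat := if 0 ≤ i then i.toNat else m - (-i).toNat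

lemma pvIdx_lt (m : Nat) (i : Int) (h1 : -(m:Int) ≤ i) (h2 : i < m) : pvIdx m i < m := by
  unfold pvIdx; split_ifs <;> omega

lemma pv_pyIdx (m : Nat) (i : Int) (h1 : -(m:Int) ≤ i) (h2 : i < m) :
    PySem.List.pyIdx? m i = some (pvIdx m i) := by
  simp only [PySem.List.pyIdx?, pvIdx]
  split_ifs <;> first | rfl | omega

lemma pv_getD {α : Type} (xs : List α) (i : Int) (d : α)
    (h1 : -(xs.length:Int) ≤ i) (h2 : i < xs.length) :
    PySem.List.pyGetD xs i d = xs[pvIdx xs.length i]'(pvIdx_lt _ _ h1 h2) := by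
  simp [PySem.List.pyGetD, PySem.List.pyGet?, pv_pyIdx xs.length i h1 h2,
    List.getElem?_eq_getElem (pvIdx_lt _ _ h1 h2)]

lemma pv_setD {α : Type} (xs : List α) (i : Int) (v : α)
    (h1 : -(xs.length:Int) ≤ i) (h2 : i < xs.length) :
    PySem.List.pySetD xs i v = xs.set (pvIdx xs.length i) v := by
  simp [PySem.List.pySetD, PySem.List.pySet?, pv_pyIdx xs.length i h1 h2]

lemma pv_sum_set (L : List Int) (j : Nat) (hj : j < L.length) (v : Int) :
    (L.set j v).sum = L.sum + v - L[j] := by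
  rw [List.sum_set]
  have hL : L.sum = (L.take j).sum + ((L.drop j).sum) := by
    rw [← List.sum_append, List.take_append_drop]
  rw [List.drop_eq_getElem_cons hj] at hL
  simp only [List.sum_cons] at hL
  rw [if_pos hj]
  omega

-- coupling invariant: A's state vs B's state (sec = the enumerate counter still to come)
def pvInv (n k : Int)
    (a : List Int × List (List Int) × List Int × List Int × Int)
    (b : List (List Int) × List Int × List Int) (sec : Int) : Prop :=
  a.2.1 = b.1 ∧ a.2.2.1 = b.2.1 ∧ a.2.2.2.1 = b.2.2 ∧ a.2.2.2.2 = sec ∧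
  a.1 = b.1.map List.sum ∧
  b.1.length = (n+1).toNat ∧ (∀ r ∈ b.1, r.length = (k+1).toNat) ∧
  b.2.1.length = (n+1).toNat ∧ b.2.2.length = (n+1).toNat

lemma pvStep_inv (n k : Int) (a : List Int × List (List Int) × List Int × List Int × Int)
    (b : List (List Int) × List Int × List Int) (sec : Int) (log : Int × Int × Int)
    (hlog : -(n+1) ≤ log.1 ∧ log.1 < n+1 ∧ -(k+1) ≤ log.2.1 ∧ log.2.1 < k+1)
    (hinv : pvInv n k a b sec) : pvInv n k (pvStepA a log) (pvStepB b (sec, log)) (sec + 1) := by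
  obtain ⟨ssum, scores, time, count, second⟩ := a
  obtain ⟨scoresB, timeB, countB⟩ := b
  obtain ⟨t, p, s⟩ := log
  obtain ⟨ht1, ht2, hp1, hp2⟩ := hlog
  obtain ⟨hsc, hti, hco, hse, hsum, hlen, hrows, hlt, hlc⟩ := hinv
  simp only at ht1 ht2 hp1 hp2 hsc hti hco hse hsum hlen hrows hlt hlc
  subst hsc hti hco hse hsum
  have htL : -((scores.length : Int)) ≤ t ∧ t < scores.length := by rw [hlen]; omega
  have jtlt : pvIdx scores.length t < scores.length := pvIdx_lt _ _ htL.1 htL.2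
  have hrow : PySem.List.pyGetD scores t [] = scores[pvIdx scores.length t] :=
    pv_getD scores t [] htL.1 htL.2
  have hrlen : (scores[pvIdx scores.length t]).length = (k+1).toNat :=
    hrows _ (List.getElem_mem _)
  have hpL : -((scores[pvIdx scores.length t]).length : Int) ≤ p ∧
      p < (scores[pvIdx scores.length t]).length := by rw [hrlen]; omega
  have jplt := pvIdx_lt _ _ hpL.1 hpL.2
  have hcurrow : PySem.List.pyGetD (scores[pvIdx scores.length t]) p 0
      = (scores[pvIdx scores.length t])[pvIdx (scores[pvIdx scores.length t]).length p] :=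
    pv_getD _ p 0 hpL.1 hpL.2
  simp only [pvStepA, pvStepB, pvInv, hrow, hcurrow]
  set jt := pvIdx scores.length t with hjt
  set row := scores[jt] with hrw
  set jp := pvIdx row.length p with hjp
  set cur := row[jp] with hc
  have hms : (scores.map List.sum).length = scores.length := by simp
  have htsame : -((scores.map List.sum).length : Int) ≤ t ∧ t < (scores.map List.sum).length := by
    rw [hms]; exact htL
  have hidsame : pvIdx (scores.map List.sum).length t = jt := by rw [hms]
  have hsetrow : ∀ v, PySem.List.pySetD row p v = row.set jp v :=
    fun v => pv_setD row p v hpL.1 hpL.2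
  have hsetsc : ∀ r, PySem.List.pySetD scores t r = scores.set jt r :=
    fun r => pv_setD scores t r htL.1 htL.2
  by_cases hgt : s > cur
  · rw [if_pos hgt, if_pos hgt]
    have hmax : max cur s = s := by omega
    refine ⟨by simp only [← hjt, ← hrw, hsetrow, hsetsc, hmax], trivial, trivial, trivial, ?_, ?_, ?_, by simp [hlt], by simp [hlc]⟩
    · -- the running sum tracks the row sum through the update
      simp only [← hjt, ← hrw]
      rw [hsetrow, hmax, hsetsc, List.map_set,
        pv_setD (scores.map List.sum) t _ htsame.1 htsame.2, hidsame]
      congr 1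
      rw [pv_getD (scores.map List.sum) t 0 htsame.1 htsame.2]
      simp only [hidsame]
      rw [List.getElem_map, pv_sum_set row jp (by omega) s]
      rw [← hrw, ← hc]
      ring
    · simp [PySem.List.length_pySetD, hlen]
    · intro r hr
      simp only [← hjt, ← hrw] at hr
      rw [hsetrow, hmax, hsetsc] at hr
      rcases List.mem_or_eq_of_mem_set hr with h | h
      · exact hrows r h
      · subst h
        rw [List.length_set, hrw]
        exact hrlen
  · rw [if_neg hgt, if_neg hgt]
    have hmax : max cur s = cur := by omega
    simp only [← hjt, ← hrw]
    have hnoop : PySem.List.pySetD scores t (PySem.List.pySetD row p (max cur s)) = scores := by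
      rw [hsetrow, hmax, hc, List.set_getElem_self, hsetsc, hrw, List.set_getElem_self]
    refine ⟨by rw [hnoop], trivial, trivial, trivial, by rw [hnoop], by rw [hnoop]; exact hlen,
      by rw [hnoop]; exact hrows, by simp [hlt], by simp [hlc]⟩

lemma pvFold_inv (n k : Int) (logs : List (Int × Int × Int))
    (hlogs : ∀ l ∈ logs, -(n+1) ≤ l.1 ∧ l.1 < n+1 ∧ -(k+1) ≤ l.2.1 ∧ l.2.1 < k+1)
    (a : List Int × List (List Int) × List Int × List Int × Int)
    (b : List (List Int) × List Int × List Int) (sec : Int)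
    (hinv : pvInv n k a b sec) :
    pvInv n k (logs.foldl pvStepA a) ((PySem.List.enumerate logs sec).foldl pvStepB b)
      (sec + logs.length) := by
  induction logs generalizing a b sec with
  | nil => simpa using hinv
  | cons x xs ih =>
    simp only [PySem.List.enumerate, List.foldl_cons]
    have := ih (fun l hl => hlogs l (List.mem_cons_of_mem _ hl)) (pvStepA a x)
      (pvStepB b (sec, x)) (sec + 1)
      (pvStep_inv n k a b sec x (hlogs x List.mem_cons_self) hinv)
    simpa [add_comm, add_assoc, add_left_comm] using this

lemma pvInit_inv (n k : Int) :
    pvInv n k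
      ((PySem.List.pyRange 0 (n+1) 1).map (fun _ => (0 : Int)),
       (PySem.List.pyRange 0 (n+1) 1).map (fun _ => (PySem.List.pyRange 0 (k+1) 1).map (fun _ => (0 : Int))),
       (PySem.List.pyRange 0 (n+1) 1).map (fun _ => (0 : Int)),
       (PySem.List.pyRange 0 (n+1) 1).map (fun _ => (0 : Int)), 1)
      (List.replicate (n+1).toNat (List.replicate (k+1).toNat (0 : Int)),
       List.replicate (n+1).toNat (0 : Int), List.replicate (n+1).toNat (0 : Int)) 1 := by
  have hmapc : ∀ (m : Int), (PySem.List.pyRange 0 m 1).map (fun _ => (0 : Int))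
      = List.replicate m.toNat (0 : Int) := by
    intro m
    rw [List.map_const']
    simp [PySem.List.length_pyRange_one]
  have hmapr : (PySem.List.pyRange 0 (n+1) 1).map
        (fun _ => (PySem.List.pyRange 0 (k+1) 1).map (fun _ => (0 : Int)))
      = List.replicate (n+1).toNat (List.replicate (k+1).toNat (0 : Int)) := by
    rw [hmapc (k+1), List.map_const']
    simp [PySem.List.length_pyRange_one]
  refine ⟨hmapr, hmapc (n+1), hmapc (n+1), rfl, ?_, by simp, ?_, by simp, by simp⟩
  · rw [hmapc (n+1), hmapr, List.map_replicate]
    simp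
  · intro r hr
    rw [List.eq_of_mem_replicate hr]
    simp

-- ===== VERDICT (by name: the statement is the Claim_ definition above) =====
theorem update_p_spec : Claim_equal_update_p := by
  intro logs n k _hdom hpre
  unfold Spec_update_p update_p update_p_alt
  simp only []
  set stB := (PySem.List.enumerate logs 1).foldl pvStepB
      (List.replicate (n+1).toNat (List.replicate (k+1).toNat (0 : Int)),
       List.replicate (n+1).toNat (0 : Int), List.replicate (n+1).toNat (0 : Int)) with hstB
  have hinv := pvFold_inv n k logs hpre _ _ 1 (pvInit_inv n k)
  rw [← hstB] at hinv
  obtain ⟨hsc, hti, hco, -, hsum, hlen, -, hlt, hlc⟩ := hinv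
  apply List.map_congr_left
  intro i hi
  rw [PySem.List.mem_pyRange_one] at hi
  rw [hti, hco, hsum]
  have hlb : stB.1.length = (n+1).toNat := hlen
  have hbm : (stB.1.map List.sum).length = stB.1.length := by simp
  have hN : ((n+1).toNat : Int) = n + 1 := by omega
  have hb1 : -(((stB.1.map List.sum).length : Int)) ≤ i ∧ i < ((stB.1.map List.sum).length : Int) := by
    rw [hbm, hlb]; omega
  have hb2 : -((stB.1.length : Int)) ≤ i ∧ i < (stB.1.length : Int) := by rw [hlb]; omega
  have hidx : pvIdx (stB.1.map List.sum).length i = pvIdx stB.1.length i := by rw [hbm]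
  rw [pv_getD (stB.1.map List.sum) i 0 hb1.1 hb1.2, pv_getD stB.1 i [] hb2.1 hb2.2]
  congr 1
  simp only [hidx]
  rw [List.getElem_map]
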